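-- pv_equiv track=rewrite | github.com/k3ll3x/python-scripts | pyra60.py | sym2num
-- ===== SOURCE A (Python) =====
-- n = {
-- 	'.': 1,
-- 	':': 2,
-- 	'|': 3,
-- 	'△ ': 9,
-- 	#'◬ ': 10,
-- 	'▲ ': 10,
-- 	'-': 12,
-- 	'=': 24,
-- 	'☰': 36,
-- 	'□ ': 48,
-- 	'o': 60,
-- }
--
-- def sym2num(symbols):
-- 	# """Convert base-60 symbols to a number based on custom notation."""
-- 	# symbols = symbols.lower().replace('0', 'o')
-- 	# num = 0
-- 	# multiplier = 1
--
-- 	# for i in reversed(symbols):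
-- 	# 	if i == 'o':
-- 	# 		num += 60 * multiplier
-- 	# 		multiplier = 1
-- 	# 	else:
-- 	# 		num += n[i] * multiplier
-- 	# return num
-- 	"""Convert base-60 symbols to a number based on custom notation."""
-- 	symbols = symbols.lower().replace('0', 'o')  # Normalize input
--
-- 	num = 0
-- 	for i in symbols:
-- 		if i != 'o':
-- 			num += n[i]# if i in n else 0
-- 		else:
-- 			num = num * 60 if num != 0 else 60
-- 	return num
-- ===== SOURCE B (Python) =====
-- n = {
-- 	'.': 1,
-- 	':': 2,
-- 	'|': 3,
-- 	'△ ': 9,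
-- 	'▲ ': 10,
-- 	'-': 12,
-- 	'=': 24,
-- 	'☰': 36,
-- 	'□ ': 48,
-- 	'o': 60,
-- }
--
-- def sym2num(symbols):
-- 	"""Convert base-60 symbols to a number: split on 'o' and fold the group digit-sums."""
-- 	groups = symbols.lower().replace('0', 'o').split('o')
-- 	sums = [sum(n[c] for c in g) for g in groups]
-- 	num = sums[0]
-- 	for v in sums[1:]:
-- 		num = (num * 60 if num != 0 else 60) + v
-- 	return num
-- ===== Notes on version B (the rewrite author's own statement) =====
-- stated objective: alternative
-- what changed: B replaces A's single per-character loop with its own branch on 'o' by splitting the normalized string on 'o', reducing each group to its digit-sum, and left-folding the (num*60 if num!=0 else 60)+sum step over the remaining group sums.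
import Mathlib
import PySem

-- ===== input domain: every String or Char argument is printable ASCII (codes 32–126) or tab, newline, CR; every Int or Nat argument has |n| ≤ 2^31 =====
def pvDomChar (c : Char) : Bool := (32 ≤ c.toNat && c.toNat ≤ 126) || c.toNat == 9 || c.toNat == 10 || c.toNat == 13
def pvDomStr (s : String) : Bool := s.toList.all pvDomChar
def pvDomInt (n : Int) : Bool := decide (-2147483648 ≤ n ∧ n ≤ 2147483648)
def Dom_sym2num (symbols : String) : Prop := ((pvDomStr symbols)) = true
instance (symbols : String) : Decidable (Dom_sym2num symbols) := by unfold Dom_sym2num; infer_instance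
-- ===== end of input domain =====

-- B replaces A's per-character loop with a different decomposition: split the
-- normalized string on 'o', take each group's digit-sum, and fold the group
-- sums (objective: alternative decomposition, same cost).

-- ===== PORT A =====
-- the module-level dict n (shared by both sources)
def nDict : PySem.Dict String Int :=
  PySem.Dict.ofList [(".", 1), (":", 2), ("|", 3), ("△ ", 9), ("▲ ", 10),
                     ("-", 12), ("=", 24), ("☰", 36), ("□ ", 48), ("o", 60)]

-- n[i] for a one-character string i; default 0 is never reached under Pre_ (Python raises KeyError there)
def nval (c : Char) : Int := (nDict.get? (String.ofList [c])).getD 0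

def sym2num (symbols : String) : Int :=
  -- symbols = symbols.lower().replace('0','o'); then the for-loop over its characters
  (PySem.Str.replace (PySem.Str.lower symbols) "0" "o").toList.foldl
    (fun num i => if i ≠ 'o' then num + nval i else (if num ≠ 0 then num * 60 else 60)) 0

-- ===== PORT B =====
-- sum(n[c] for c in g)
def groupSum (g : List Char) : Int := g.foldl (fun a c => a + nval c) 0

def sym2num_alt (symbols : String) : Int :=
  -- groups = normalized.split('o'); sums = [groupSum g]; num = sums[0]; fold over sums[1:]
  match ((PySem.Chars.splitOn
      (PySem.Str.replace (PySem.Str.lower symbols) "0" "o").toList ['o']).map groupSum) with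
  | [] => 0   -- unreachable: str.split always returns at least one piece
  | h :: t => t.foldl (fun num v => (if num ≠ 0 then num * 60 else 60) + v) h

-- ===== PRECONDITION & SPEC =====
-- Pre_ excludes exactly the inputs on which Python A raises KeyError: a character whose
-- normalized form (lowercase, '0'→'o') is not itself a key of n, i.e. anything other
-- than '.', ':', '|', '-', '=', '☰', 'o'/'O'/'0' (the multi-character keys like '△ '
-- can never match a single character, so such characters also raise).
def symChar (c : Char) : Bool :=
  c == '.' || c == ':' || c == '|' || c == '-' || c == '=' || c == '☰' ||
  c == 'o' || c == 'O' || c == '0'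
def Pre_sym2num (symbols : String) : Prop := (symbols.toList.all symChar) = true
instance (symbols : String) : Decidable (Pre_sym2num symbols) := by
  unfold Pre_sym2num; infer_instance
def pvWitness_sym2num : String := "=|O0."

def Spec_sym2num (symbols : String) (out : Int) : Prop := out = sym2num_alt symbols
instance (symbols : String) (out : Int) : Decidable (Spec_sym2num symbols out) := by
  unfold Spec_sym2num; infer_instance

-- ===== CLAIM (what is proved, stated in full; the proofs are below) =====
def Claim_equal_sym2num : Prop := ∀ (symbols : String), Dom_sym2num symbols → Pre_sym2num symbols → Spec_sym2num symbols (sym2num symbols)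

-- ===== LEMMAS AND PROOFS =====

-- reference single-character split, convenient for induction
def refSplit (xs : List Char) : List (List Char) :=
  match xs with
  | [] => [[]]
  | c :: rest =>
      if c = 'o' then [] :: refSplit rest
      else (c :: (refSplit rest).headI) :: (refSplit rest).tail

theorem refSplit_ne_nil (xs : List Char) : refSplit xs ≠ [] := by
  cases xs with
  | nil => simp [refSplit]
  | cons c rest => by_cases h : c = 'o' <;> simp [refSplit, h]

theorem splitOn_go_spec (l : List Char) : ∀ (fuel : Nat) (cur : List Char)
    (acc : List (List Char)), l.length ≤ fuel →
    PySem.Chars.splitOn.go ['o'] fuel l cur acc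
      = acc.reverse ++ (cur.reverse ++ (refSplit l).headI) :: (refSplit l).tail := by
  induction l with
  | nil =>
    intro fuel cur acc _
    cases fuel <;> simp [PySem.Chars.splitOn.go, refSplit]
  | cons c rest ih =>
    intro fuel cur acc hf
    cases fuel with
    | zero => simp at hf
    | succ fuel =>
      by_cases h : c = 'o'
      · subst h
        have : (['o'] : List Char).isPrefixOf ('o' :: rest) = true := by
          simp [List.isPrefixOf]
        rw [PySem.Chars.splitOn.go]
        simp only [this, if_pos, List.length_cons, List.length_nil, List.drop_succ_cons,
          List.drop_zero]
        rw [ih fuel [] (cur.reverse :: acc) (by simpa using Nat.le_of_succ_le_succ hf)]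
        cases hr : refSplit rest with
        | nil => exact absurd hr (refSplit_ne_nil rest)
        | cons g t => simp [refSplit, hr]
      · have hpre : (['o'] : List Char).isPrefixOf (c :: rest) = false := by
          simp [List.isPrefixOf]
          intro hc; exact absurd hc.symm h
        rw [PySem.Chars.splitOn.go]
        simp only [hpre, Bool.false_eq_true, if_false]
        rw [ih fuel (c :: cur) acc (by simpa using Nat.le_of_succ_le_succ hf)]
        simp [refSplit, h]

theorem splitOn_eq_refSplit (xs : List Char) :
    PySem.Chars.splitOn xs ['o'] = refSplit xs := by
  have h := splitOn_go_spec xs (xs.length + 1) [] [] (Nat.le_succ _)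
  rw [PySem.Chars.splitOn] at *
  rw [h]
  have hne := refSplit_ne_nil xs
  cases hr : refSplit xs with
  | nil => exact absurd hr hne
  | cons g t => simp

theorem groupSum_shift (g : List Char) (a : Int) :
    g.foldl (fun x c => x + nval c) a = a + groupSum g := by
  induction g generalizing a with
  | nil => simp [groupSum]
  | cons c rest ih =>
    simp only [List.foldl, groupSum] at *
    rw [ih, ih (0 + nval c)]
    ring

theorem fold_eq_groups (xs : List Char) : ∀ (num : Int),
    xs.foldl (fun num i => if i ≠ 'o' then num + nval i
                           else (if num ≠ 0 then num * 60 else 60)) num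
      = ((refSplit xs).map groupSum).tail.foldl
          (fun num v => (if num ≠ 0 then num * 60 else 60) + v)
          (num + groupSum (refSplit xs).headI) := by
  induction xs with
  | nil => intro num; simp [refSplit, groupSum]
  | cons c rest ih =>
    intro num
    by_cases h : c = 'o'
    · subst h
      simp only [List.foldl, if_neg (by simp : ¬('o' ≠ 'o'))]
      rw [ih]
      have hne := refSplit_ne_nil rest
      cases hr : refSplit rest with
      | nil => exact absurd hr hne
      | cons g t =>
        simp [refSplit, hr, List.foldl, groupSum]
    · simp only [List.foldl, if_pos h]
      rw [ih]
      cases hr : refSplit rest with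
      | nil => exact absurd hr (refSplit_ne_nil rest)
      | cons g t =>
        simp only [refSplit, if_neg h, hr, List.headI, List.tail_cons, List.map_cons,
          List.foldl_cons, groupSum, List.foldl]
        congr 1
        rw [groupSum_shift g (0 + nval c)]
        unfold groupSum
        ring

-- ===== VERDICT (by name: the statement is the Claim_ definition above) =====
theorem sym2num_spec : Claim_equal_sym2num := by
  intro symbols _ _
  unfold Spec_sym2num sym2num sym2num_alt
  rw [splitOn_eq_refSplit, fold_eq_groups]
  cases hr : refSplit (PySem.Str.replace (PySem.Str.lower symbols) "0" "o").toList with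
  | nil => exact absurd hr (refSplit_ne_nil _)
  | cons g t => simp
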